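-- pv_equiv track=rewrite | github.com/tuxikus/aoc-solutions | 2025/01/main.py | turn_left
-- ===== SOURCE A (Python) =====
-- def turn_left(value, amount):
--     click = 0
--     for i in range(0, amount):
--         value -= 1
--         if value == 0:
--             click += 1
--         if value < 0:
--             value = 99
--
--     if value == 0:
--         click -=1
--
--     return value, click
-- ===== SOURCE B (Python) =====
-- def turn_left(value, amount):
--     if amount <= 0:
--         final, click = value, 0
--     elif value > amount:
--         final, click = value - amount, 0
--     else:
--         start = value if value >= 1 else 100
--         final = (start - amount) % 100
--         click = (amount - start) // 100 + 1
--     if final == 0: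
--         click -= 1
--     return final, click
-- ===== Notes on version B (the rewrite author's own statement) =====
-- stated objective: faster
-- what changed: Replaces A's per-step countdown loop over range(amount) with a closed-form computation: the final dial value via modular arithmetic ((start - amount) % 100, with start = value if value >= 1 else 100) and the click count via floor division ((amount - start) // 100 + 1), keeping A's final zero-adjustment.
import Mathlib
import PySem

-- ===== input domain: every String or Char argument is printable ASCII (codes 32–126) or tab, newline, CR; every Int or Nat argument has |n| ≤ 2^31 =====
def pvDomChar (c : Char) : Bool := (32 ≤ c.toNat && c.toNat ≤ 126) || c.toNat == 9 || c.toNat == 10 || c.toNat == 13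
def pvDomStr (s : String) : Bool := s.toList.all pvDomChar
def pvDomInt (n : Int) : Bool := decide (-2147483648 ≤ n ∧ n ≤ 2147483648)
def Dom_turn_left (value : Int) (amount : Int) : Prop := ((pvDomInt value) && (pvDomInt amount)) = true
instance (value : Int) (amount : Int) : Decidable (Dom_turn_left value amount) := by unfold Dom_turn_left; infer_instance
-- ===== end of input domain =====

-- B replaces A's O(amount) step-by-step countdown loop with O(1) closed-form modular arithmetic (objective: faster, asymptotic).

-- ===== PORT A =====
-- loop body of A's for-loop (value -= 1; click on 0; wrap below 0 to 99)
def turnStep (s : Int × Int) : Int × Int :=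
  let v := s.1 - 1
  let c := if v = 0 then s.2 + 1 else s.2
  (if v < 0 then 99 else v, c)

def turn_left (value : Int) (amount : Int) : Int × Int :=
  let s := (PySem.List.pyRange 0 amount 1).foldl (fun s _ => turnStep s) (value, 0)
  let click := if s.1 = 0 then s.2 - 1 else s.2
  (s.1, click)

-- ===== PORT B =====
def turn_left_alt (value : Int) (amount : Int) : Int × Int :=
  let p : Int × Int :=
    if amount ≤ 0 then (value, 0)
    else if value > amount then (value - amount, 0)
    else
      let start := if 1 ≤ value then value else 100
      (PySem.Int.mod (start - amount) 100, PySem.Int.floordiv (amount - start) 100 + 1)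
  let click := if p.1 = 0 then p.2 - 1 else p.2
  (p.1, click)

-- ===== PRECONDITION & SPEC =====
def Spec_turn_left (value : Int) (amount : Int) (out : Int × Int) : Prop := out = turn_left_alt value amount
instance (value : Int) (amount : Int) (out : Int × Int) : Decidable (Spec_turn_left value amount out) := by unfold Spec_turn_left; infer_instance

-- ===== CLAIM (what is proved, stated in full; the proofs are below) =====
def Claim_equal_turn_left : Prop := ∀ (value : Int) (amount : Int), Dom_turn_left value amount → Spec_turn_left value amount (turn_left value amount)

-- ===== LEMMAS AND PROOFS =====

-- the element-ignoring foldl is an iterate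
lemma foldl_turnStep_iterate (l : List Int) (init : Int × Int) :
    l.foldl (fun s _ => turnStep s) init = turnStep^[l.length] init := by
  induction l generalizing init with
  | nil => rfl
  | cons x xs ih => simp [List.foldl_cons, ih, Function.iterate_succ_apply]

-- closed form of the loop state after n ≥ 1 iterations
lemma iter_turnStep_closed : ∀ (n : Nat) (v : Int), 1 ≤ n →
    turnStep^[n] (v, 0) =
      if 1 ≤ v ∧ (n : Int) < v then (v - n, 0)
      else (((if 1 ≤ v then v else 100) - n) % 100,
            ((n : Int) - (if 1 ≤ v then v else 100)) / 100 + 1) := by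
  intro n
  induction n with
  | zero => intro v h; omega
  | succ m ih =>
    intro v _
    rcases Nat.eq_zero_or_pos m with hm | hm
    · subst hm
      rw [Function.iterate_succ_apply', Function.iterate_zero_apply]
      simp only [turnStep]
      split_ifs <;> simp only [Prod.mk.injEq] <;> push_cast at * <;> constructor <;> omega
    · rw [Function.iterate_succ_apply', ih v hm]
      split_ifs with h1 <;> simp only [turnStep] <;>
        split_ifs <;> simp only [Prod.mk.injEq] <;> push_cast at * <;> constructor <;> omega

theorem turn_left_spec : Claim_equal_turn_left := by
  intro value amount _
  unfold Spec_turn_left turn_left turn_left_alt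
  by_cases h : amount ≤ 0
  · have h0 : (amount - 0).toNat = 0 := by omega
    have hr : PySem.List.pyRange 0 amount 1 = [] := by
      rw [PySem.List.pyRange_one, h0]; rfl
    simp [hr, h]
  · have hlen : (PySem.List.pyRange 0 amount 1).length = amount.toNat :=
      by simp [PySem.List.length_pyRange_one]
    have hn : 1 ≤ amount.toNat := by omega
    have h' : 0 < amount := by omega
    have hcast : ((amount.toNat : Int)) = amount := Int.toNat_of_nonneg (by omega)
    rw [foldl_turnStep_iterate, hlen, iter_turnStep_closed _ _ hn, hcast]
    simp only [PySem.Int.mod_eq_emod_of_pos (by norm_num : (0:Int) < 100), PySem.Int.floordiv_eq_ediv_of_pos (by norm_num : (0:Int) < 100)]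
    have hA : ¬ amount ≤ 0 := by omega
    by_cases hv : 1 ≤ value ∧ amount < value
    · simp only [if_pos hv, if_neg hA, if_pos (by omega : value > amount)]
    · have hvb : ¬ value > amount := by omega
      simp [hA, hvb]
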